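-- pv_equiv track=rewrite | github.com/WJakubowsk/StudentsDataHack2022 | preprocessing/preprocessing.py | transform
-- ===== SOURCE A (Python) =====
-- def transform(text):
--     lex = text.split(',')
--     out = []
--     for item in lex:
--         for el in ['{', '}', '"']:
--             item = item.replace(el, '')
--         for el in ['/',':',' ','-','.','&',')','(','\'']:
--             item = item.replace(el,'_')
--         item = item.lower()
--         item = item.replace('matress','mattress')
--         out.append(item)
--     return out
-- ===== SOURCE B (Python) =====
-- DELETE = set('{}"')
-- SUB = {c: '_' for c in "/: -.&)('"}
--
-- def transform(text):
--     out = []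
--     for token in text.split(','):
--         chars = []
--         for c in token:
--             if c in DELETE:
--                 continue
--             chars.append(SUB.get(c, c.lower()))
--         out.append(''.join(chars).replace('matress', 'mattress'))
--     return out
-- ===== Notes on version B (the rewrite author's own statement) =====
-- stated objective: alternative
-- what changed: A runs thirteen sequential full-string replace passes per comma token; B instead makes a single table-driven character pass per token (delete-set skips {, }, "; a substitution dict maps the nine special chars to '_'; kept chars are lowercased on the fly), then one final 'matress'->'mattress' substring replace on the joined result.
import Mathlib
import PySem

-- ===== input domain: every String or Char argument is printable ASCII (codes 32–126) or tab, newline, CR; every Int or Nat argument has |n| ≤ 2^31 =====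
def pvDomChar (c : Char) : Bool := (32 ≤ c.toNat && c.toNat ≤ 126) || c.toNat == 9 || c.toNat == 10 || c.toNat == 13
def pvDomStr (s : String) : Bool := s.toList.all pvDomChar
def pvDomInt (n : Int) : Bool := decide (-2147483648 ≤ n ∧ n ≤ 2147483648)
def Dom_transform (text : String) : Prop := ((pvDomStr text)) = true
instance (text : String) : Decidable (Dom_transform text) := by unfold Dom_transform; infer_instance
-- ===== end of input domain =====

-- B replaces A's thirteen full-string replace passes per token by one table-driven
-- character pass (delete-set / substitution-dict / lowercase), same return value (objective: alternative).

-- ===== PORT A =====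
def transform (text : String) : List String :=
  ((PySem.Str.split? text ",").getD []).foldl (fun out item =>
    let item := (["{", "}", "\""]).foldl (fun it el => PySem.Str.replace it el "") item
    let item := (["/", ":", " ", "-", ".", "&", ")", "(", "'"]).foldl (fun it el => PySem.Str.replace it el "_") item
    let item := PySem.Str.lower item
    let item := PySem.Str.replace item "matress" "mattress"
    out ++ [item]) []

-- ===== PORT B =====
-- DELETE = set('{}"')
def pvDelete : PySem.Set Char := PySem.Set.ofList "{}\"".toList
-- SUB = {c: '_' for c in "/: -.&)('"}
def pvSub : PySem.Dict Char Char :=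
  "/: -.&)('".toList.foldl (fun d c => d.insert c '_') PySem.Dict.empty

def transform_alt (text : String) : List String :=
  ((PySem.Str.split? text ",").getD []).foldl (fun out token =>
    let chars := token.toList.foldl (fun cs c =>
      if pvDelete.contains c then cs
      else cs ++ [pvSub.getD c (PySem.Chars.lowerChar c)]) []
    -- ''.join(chars) where chars is a list of single characters = String.ofList chars (exact)
    out ++ [PySem.Str.replace (String.ofList chars) "matress" "mattress"]) []

-- ===== PRECONDITION & SPEC =====
def Spec_transform (text : String) (out : List String) : Prop := out = transform_alt text
instance (text : String) (out : List String) : Decidable (Spec_transform text out) := by unfold Spec_transform; infer_instance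

-- ===== CLAIM (what is proved, stated in full; the proofs are below) =====
def Claim_equal_transform : Prop := ∀ (text : String), Dom_transform text → Spec_transform text (transform text)

-- ===== LEMMAS AND PROOFS =====

-- the per-character function B's pass computes
def pvNorm (c : Char) : Option Char :=
  if pvDelete.contains c then none
  else some (pvSub.getD c (PySem.Chars.lowerChar c))

lemma go_single (a : Char) (new : List Char) :
    ∀ (fuel : Nat) (l acc : List Char), l.length ≤ fuel →
    PySem.Chars.replace.go [a] new fuel l acc
      = acc.reverse ++ l.flatMap (fun c => if c = a then new else [c]) := by
  intro fuel
  induction fuel with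
  | zero =>
    intro l acc h
    have : l = [] := by cases l <;> simp_all
    subst this
    simp [PySem.Chars.replace.go]
  | succ n ih =>
    intro l acc h
    cases l with
    | nil => simp [PySem.Chars.replace.go]
    | cons c t =>
      simp only [PySem.Chars.replace.go, List.isPrefixOf, List.flatMap_cons]
      by_cases hc : c = a
      · subst hc
        simp only [BEq.rfl, Bool.and_self, if_true]
        have hd : List.drop [c].length (c :: t) = t := rfl
        rw [hd, ih t (new.reverse ++ acc) (by simpa using Nat.le_of_succ_le_succ h)]
        simp
      · have hb : (a == c) = false := by
          rw [beq_eq_false_iff_ne]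
          exact fun e => hc e.symm
        simp only [hb, Bool.false_and, if_neg hc, Bool.false_eq_true, if_false]
        rw [ih t (c :: acc) (by simpa using Nat.le_of_succ_le_succ h)]
        simp

lemma replace_single (s : List Char) (a : Char) (new : List Char) :
    PySem.Chars.replace s [a] new = s.flatMap (fun c => if c = a then new else [c]) := by
  have := go_single a new s.length s [] le_rfl
  simpa [PySem.Chars.replace] using this

lemma replace_single_del (s : List Char) (a : Char) :
    PySem.Chars.replace s [a] [] = s.filterMap (fun c => if c = a then none else some c) := by
  rw [replace_single]
  induction s with
  | nil => rfl
  | cons c t ih => by_cases h : c = a <;> simp [h, ih]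

lemma replace_single_sub (s : List Char) (a b : Char) :
    PySem.Chars.replace s [a] [b] = s.map (fun c => if c = a then b else c) := by
  rw [replace_single]
  induction s with
  | nil => rfl
  | cons c t ih => by_cases h : c = a <;> simp [h, ih]

lemma inner_foldl (cs : List Char) (acc : List Char) :
    cs.foldl (fun out c =>
      if pvDelete.contains c then out
      else out ++ [pvSub.getD c (PySem.Chars.lowerChar c)]) acc
      = acc ++ cs.filterMap pvNorm := by
  induction cs generalizing acc with
  | nil => simp
  | cons c t ih =>
    by_cases h : pvDelete.contains c = true
    · have hn : pvNorm c = none := by unfold pvNorm; rw [if_pos h]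
      rw [List.foldl_cons, if_pos h, ih, List.filterMap_cons, hn]
    · have hn : pvNorm c = some (pvSub.getD c (PySem.Chars.lowerChar c)) := by
        unfold pvNorm; rw [if_neg h]
      rw [List.foldl_cons, if_neg h, ih, List.filterMap_cons, hn]
      simp

lemma pipe_eq (cs : List Char) :
    PySem.Chars.lower
      (PySem.Chars.replace (PySem.Chars.replace (PySem.Chars.replace (PySem.Chars.replace (PySem.Chars.replace (PySem.Chars.replace (PySem.Chars.replace (PySem.Chars.replace (PySem.Chars.replace
        (PySem.Chars.replace (PySem.Chars.replace (PySem.Chars.replace cs ['{'] []) ['}'] []) ['"'] [])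
        ['/'] ['_']) [':'] ['_']) [' '] ['_']) ['-'] ['_']) ['.'] ['_']) ['&'] ['_']) [')'] ['_']) ['('] ['_']) ['\''] ['_'])
      = cs.filterMap pvNorm := by
  simp only [replace_single_del, replace_single_sub, PySem.Chars.lower,
    List.filterMap_filterMap, List.map_filterMap]
  refine List.filterMap_congr ?_
  intro c _
  by_cases h1 : c = '{'; · subst h1; decide
  by_cases h2 : c = '}'; · subst h2; decide
  by_cases h3 : c = '"'; · subst h3; decide
  by_cases h4 : c = '/'; · subst h4; decide
  by_cases h5 : c = ':'; · subst h5; decide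
  by_cases h6 : c = ' '; · subst h6; decide
  by_cases h7 : c = '-'; · subst h7; decide
  by_cases h8 : c = '.'; · subst h8; decide
  by_cases h9 : c = '&'; · subst h9; decide
  by_cases h10 : c = ')'; · subst h10; decide
  by_cases h11 : c = '('; · subst h11; decide
  by_cases h12 : c = '\''; · subst h12; decide
  simp only [pvNorm, pvDelete, pvSub]
  simp [h1,h2,h3,h4,h5,h6,h7,h8,h9,h10,h11,h12, PySem.Set.contains, PySem.Dict.getD,
    PySem.Dict.get?, PySem.Set.ofList, PySem.Dict.empty, PySem.Dict.insert, beq_iff_eq,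
    Ne.symm h4, Ne.symm h5, Ne.symm h6, Ne.symm h7, Ne.symm h8, Ne.symm h9,
    Ne.symm h10, Ne.symm h11, Ne.symm h12]

set_option maxRecDepth 8000 in
lemma item_eq (item : String) :
    PySem.Str.replace
      (PySem.Str.lower
        ((["/", ":", " ", "-", ".", "&", ")", "(", "'"] : List String).foldl
          (fun it el => PySem.Str.replace it el "_")
          ((["{", "}", "\""] : List String).foldl
            (fun it el => PySem.Str.replace it el "") item)))
      "matress" "mattress"
    = PySem.Str.replace
        (String.ofList (item.toList.foldl (fun cs c =>
          if pvDelete.contains c then cs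
          else cs ++ [pvSub.getD c (PySem.Chars.lowerChar c)]) []))
        "matress" "mattress" := by
  rw [inner_foldl]
  have h : (PySem.Str.lower
      ((["/", ":", " ", "-", ".", "&", ")", "(", "'"] : List String).foldl
        (fun it el => PySem.Str.replace it el "_")
        ((["{", "}", "\""] : List String).foldl
          (fun it el => PySem.Str.replace it el "") item))).toList
      = item.toList.filterMap pvNorm := by
    simp only [List.foldl_cons, List.foldl_nil, PySem.Str.toList_lower, PySem.Str.toList_replace]
    simpa using pipe_eq item.toList
  have h2 := congrArg String.ofList h
  rw [String.ofList_toList] at h2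
  rw [h2, List.nil_append]

lemma foldl_push_congr {α β : Type} (F G : α → β) (h : ∀ x, F x = G x) (l : List α) (acc : List β) :
    l.foldl (fun out x => out ++ [F x]) acc = l.foldl (fun out x => out ++ [G x]) acc := by
  rw [show F = G from funext h]

set_option maxRecDepth 8000 in
theorem transform_spec : Claim_equal_transform := by
  intro text _
  unfold Spec_transform transform transform_alt
  exact
    (foldl_push_congr
      (fun item => PySem.Str.replace
        (PySem.Str.lower
          ((["/", ":", " ", "-", ".", "&", ")", "(", "'"] : List String).foldl
            (fun it el => PySem.Str.replace it el "_")
            ((["{", "}", "\""] : List String).foldl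
              (fun it el => PySem.Str.replace it el "") item)))
        "matress" "mattress")
      (fun token => PySem.Str.replace
        (String.ofList (token.toList.foldl (fun cs c =>
          if pvDelete.contains c then cs
          else cs ++ [pvSub.getD c (PySem.Chars.lowerChar c)]) []))
        "matress" "mattress")
      item_eq ((PySem.Str.split? text ",").getD []) []).symm.symm
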